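-- pv_equiv track=rewrite | github.com/thalper/PokerBot | tests.py | Trips
-- ===== SOURCE A (Python) =====
-- def Trips(hand):
--     copyHand = hand.copy()
--     for i in range(len(copyHand)):
--         copyHand[i] = (copyHand[i]) % 13
--     copyHand.sort(reverse=True)
--     kicker = 0
--     while len(copyHand) > 2:
--         val = copyHand[0]
--         count = 0
--         for card in copyHand:
--             if card == val:
--                 count += 1
--         if count > 2:
--             copyHand.remove(copyHand[0])
--             kicker = max(copyHand + [kicker])
--             return True, val, kicker
--         kicker = max([kicker] + [copyHand[0]])
--         copyHand.remove(copyHand[0])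
--
--     return False, None, None
-- ===== SOURCE B (Python) =====
-- def Trips(hand):
--     ranks = [c % 13 for c in hand]
--     for v in range(12, -1, -1):
--         if ranks.count(v) >= 3:
--             return True, v, max(ranks)
--     return False, None, None
-- ===== Notes on version B (the rewrite author's own statement) =====
-- stated objective: simpler
-- what changed: B drops A's sort and scan-and-remove while-loop entirely: it computes the rank list once, scans candidate ranks 12..0 for the first with count >= 3, and returns the global max rank as kicker (A's accumulated kicker always collapses to it).
import Mathlib
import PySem

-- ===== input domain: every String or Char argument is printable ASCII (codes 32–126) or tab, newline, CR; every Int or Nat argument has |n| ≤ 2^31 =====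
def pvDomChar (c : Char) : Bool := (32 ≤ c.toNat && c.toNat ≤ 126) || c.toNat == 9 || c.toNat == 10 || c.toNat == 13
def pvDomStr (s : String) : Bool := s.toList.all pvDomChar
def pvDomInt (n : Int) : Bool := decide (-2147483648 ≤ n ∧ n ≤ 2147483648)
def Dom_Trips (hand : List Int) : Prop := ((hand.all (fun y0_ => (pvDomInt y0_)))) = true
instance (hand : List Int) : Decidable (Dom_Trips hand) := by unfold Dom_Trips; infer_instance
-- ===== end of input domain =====

-- B replaces A's sort + repeated scan-and-remove loop by a single rank list scanned
-- once per candidate rank 12..0 (objective: simpler; no speed claim).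

-- ===== PORT A =====
-- the while-loop of A: state = (copyHand, kicker); copyHand.remove(copyHand[0])
-- removes the first occurrence of the head, i.e. yields the tail `rest`
def TripsLoop : List Int → Int → Bool × Option Int × Option Int
  | val :: rest, kicker =>
    if (val :: rest).length > 2 then
      let count := PySem.List.count (val :: rest) val
      if count > 2 then
        -- kicker = max(copyHand + [kicker]) after the removal; list is nonempty
        (true, some val, some ((PySem.List.max? (rest ++ [kicker]) (fun y => y)).getD 0))
      else
        TripsLoop rest ((PySem.List.max? ([kicker] ++ [val]) (fun y => y)).getD 0)
    else (false, none, none)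
  | [], _ => (false, none, none)

def Trips (hand : List Int) : Bool × Option Int × Option Int :=
  let copyHand := hand.map (fun c => PySem.Int.mod c 13)    -- the index loop copyHand[i] = copyHand[i] % 13
  TripsLoop (PySem.List.sorted copyHand (fun y => y) true) 0

-- ===== PORT B =====
-- B's for-loop over range(12, -1, -1) with an early return
def TripsAltScan (ranks : List Int) : List Int → Bool × Option Int × Option Int
  | [] => (false, none, none)
  | v :: vs =>
    if PySem.List.count ranks v ≥ 3 then
      -- max(ranks): ranks is nonempty here (count ≥ 3)
      (true, some v, some ((PySem.List.max? ranks (fun y => y)).getD 0))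
    else TripsAltScan ranks vs

def Trips_alt (hand : List Int) : Bool × Option Int × Option Int :=
  let ranks := hand.map (fun c => PySem.Int.mod c 13)
  TripsAltScan ranks (PySem.List.pyRange 12 (-1) (-1))

-- ===== PRECONDITION & SPEC =====
def Spec_Trips (hand : List Int) (out : Bool × Option Int × Option Int) : Prop := out = Trips_alt hand
instance (hand : List Int) (out : Bool × Option Int × Option Int) : Decidable (Spec_Trips hand out) := by unfold Spec_Trips; infer_instance

-- ===== CLAIM (what is proved, stated in full; the proofs are below) =====
def Claim_equal_Trips : Prop := ∀ (hand : List Int), Dom_Trips hand → Spec_Trips hand (Trips hand)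

-- ===== LEMMAS AND PROOFS =====

theorem foldl_max_max (l : List Int) (a b : Int) :
    List.foldl max (max a b) l = max a (List.foldl max b l) := by
  induction l generalizing b with
  | nil => rfl
  | cons x t ih =>
    simp only [List.foldl_cons]
    rw [max_assoc, ih]

-- head of filtering a descending list is the greatest member satisfying p
theorem head_filter_desc (l : List Int) (p : Int → Bool)
    (hs : l.Pairwise (fun a b : Int => b ≤ a)) (v : Int) :
    (l.filter p).head? = some v ↔ (v ∈ l ∧ p v ∧ ∀ w ∈ l, p w → w ≤ v) := by
  induction l with
  | nil => simp
  | cons x t ih =>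
    rcases List.pairwise_cons.mp hs with ⟨hx, ht⟩
    cases hpx : p x with
    | true =>
      rw [List.filter_cons, if_pos hpx, List.head?_cons]
      constructor
      · rintro h
        rw [Option.some_inj] at h
        subst h
        refine ⟨List.mem_cons_self, hpx, ?_⟩
        intro w hw _
        rcases List.mem_cons.mp hw with rfl | hw
        · exact le_refl _
        · exact hx w hw
      · rintro ⟨hv, _, hmax⟩
        have h1 : x ≤ v := hmax x List.mem_cons_self hpx
        rcases List.mem_cons.mp hv with rfl | hv
        · rfl
        · rw [Option.some_inj]
          exact le_antisymm h1 (hx v hv)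
    | false =>
      rw [List.filter_cons, if_neg (by simp [hpx]), ih ht]
      constructor
      · rintro ⟨hv, hp, hmax⟩
        refine ⟨List.mem_cons_of_mem _ hv, hp, ?_⟩
        intro w hw hpw
        rcases List.mem_cons.mp hw with rfl | hw
        · rw [hpx] at hpw; exact absurd hpw (by simp)
        · exact hmax w hw hpw
      · rintro ⟨hv, hp, hmax⟩
        rcases List.mem_cons.mp hv with rfl | hv
        · rw [hpx] at hp; exact absurd hp (by simp)
        · exact ⟨hv, hp, fun w hw hpw => hmax w (List.mem_cons_of_mem _ hw) hpw⟩

theorem head_filter_none (l : List Int) (p : Int → Bool) :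
    (l.filter p).head? = none ↔ ∀ w ∈ l, ¬ p w = true := by
  rw [List.head?_eq_none_iff, List.filter_eq_nil_iff]

-- B's scan is "first candidate with count ≥ 3", plus the global max as kicker
theorem scan_spec (ranks : List Int) (cs : List Int) :
    TripsAltScan ranks cs =
      match (cs.filter (fun v => decide (3 ≤ PySem.List.count ranks v))).head? with
      | none => (false, none, none)
      | some v => (true, some v, some ((PySem.List.max? ranks (fun y => y)).getD 0)) := by
  induction cs with
  | nil => rfl
  | cons c cs ih =>
    rw [List.filter_cons]
    by_cases h : 3 ≤ PySem.List.count ranks c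
    · have h' : 3 ≤ List.count c ranks := by rw [← PySem.List.count_eq]; exact h
      rw [if_pos (decide_eq_true h), List.head?_cons]
      rw [show TripsAltScan ranks (c :: cs) =
        (true, some c, some ((PySem.List.max? ranks (fun y => y)).getD 0)) from by
          simp [TripsAltScan, h']]
    · have h' : ¬ 3 ≤ List.count c ranks := by rw [← PySem.List.count_eq]; exact h
      rw [if_neg (by simpa using h)]
      rw [show TripsAltScan ranks (c :: cs) = TripsAltScan ranks cs from by
        simp [TripsAltScan, h']]
      exact ih

-- A's while-loop, on a descending list, finds the first (= greatest) element whose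
-- count is ≥ 3 and returns the running max of kicker and all elements
theorem loop_spec (l : List Int) (k : Int)
    (hs : l.Pairwise (fun a b : Int => b ≤ a)) :
    TripsLoop l k =
      match (l.filter (fun v => decide (3 ≤ PySem.List.count l v))).head? with
      | none => (false, none, none)
      | some v => (true, some v, some (l.foldl max k)) := by
  induction l generalizing k with
  | nil => rfl
  | cons val rest ih =>
    rcases List.pairwise_cons.mp hs with ⟨hval, hrest⟩
    have hLc : PySem.List.count (val :: rest) val = List.count val rest + 1 := by
      rw [PySem.List.count_eq, List.count_cons_self]
    by_cases hlen : (val :: rest).length > 2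
    · have hl2 : 2 ≤ rest.length := by simp at hlen; omega
      by_cases hc : PySem.List.count (val :: rest) val > 2
      · -- trip found at the head
        have h2 : 2 ≤ List.count val rest := by omega
        have hdec : decide (3 ≤ PySem.List.count (val :: rest) val) = true :=
          decide_eq_true (by omega)
        rw [List.filter_cons, if_pos hdec, List.head?_cons]
        rw [show TripsLoop (val :: rest) k =
            (true, some val, some ((PySem.List.max? (rest ++ [k]) (fun y => y)).getD 0)) from by
          simp [TripsLoop, hl2, h2]]
        -- val occurs again in rest, so rest's head equals val
        have hmem : val ∈ rest := List.count_pos_iff.mp (by omega)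
        obtain ⟨r, rs, rfl⟩ : ∃ r rs, rest = r :: rs := by
          cases rest with
          | nil => simp at hmem
          | cons r rs => exact ⟨r, rs, rfl⟩
        have hr : r = val := by
          rcases List.pairwise_cons.mp hrest with ⟨hr2, _⟩
          rcases List.mem_cons.mp hmem with h | hv
          · exact h.symm
          · exact le_antisymm (hval r List.mem_cons_self) (hr2 val hv)
        subst hr
        rw [show (r :: rs) ++ [k] = r :: (rs ++ [k]) from rfl, PySem.List.max?_id_cons]
        simp only [Option.getD_some]
        have hm : List.foldl max r (rs ++ [k]) = List.foldl max k (r :: r :: rs) := by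
          rw [List.foldl_append]
          simp only [List.foldl_cons, List.foldl_nil]
          rw [show max (max k r) r = max k r from by rw [max_assoc, max_self],
            foldl_max_max rs k r, max_comm]
        rw [hm]
      · -- head is not a trip: drop it and recurse
        have hnc : ¬ 2 ≤ List.count val rest := by omega
        have hk' : (PySem.List.max? ([k] ++ [val]) (fun y => y)).getD 0 = max k val := by
          rw [show [k] ++ [val] = k :: [val] from rfl, PySem.List.max?_id_cons]
          simp
        rw [show TripsLoop (val :: rest) k =
            TripsLoop rest ((PySem.List.max? ([k] ++ [val]) (fun y => y)).getD 0) from by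
          simp [TripsLoop, hl2, hnc], hk', ih (max k val) hrest]
        have hfeq : rest.filter (fun v => decide (3 ≤ PySem.List.count rest v)) =
            rest.filter (fun v => decide (3 ≤ PySem.List.count (val :: rest) v)) := by
          apply List.filter_congr
          intro w hw
          by_cases hwv : w = val
          · subst hwv
            have h2 := PySem.List.count_eq rest w
            simp only [decide_eq_decide]
            omega
          · have h1 := PySem.List.count_eq (val :: rest) w
            have h2 := PySem.List.count_eq rest w
            rw [List.count_cons_of_ne (by exact fun h => hwv h.symm)] at h1
            simp only [decide_eq_decide]
            omega
        rw [hfeq]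
        have hdrop : ((val :: rest).filter
            (fun v => decide (3 ≤ PySem.List.count (val :: rest) v))) =
            rest.filter (fun v => decide (3 ≤ PySem.List.count (val :: rest) v)) := by
          rw [List.filter_cons, if_neg (by simp; omega)]
        rw [hdrop]
        rfl
    · -- length ≤ 2: no element can have count ≥ 3
      have hnl : ¬ 2 ≤ rest.length := by simp at hlen; omega
      have hfil : ((val :: rest).filter
          (fun v => decide (3 ≤ PySem.List.count (val :: rest) v))) = [] := by
        rw [List.filter_eq_nil_iff]
        intro w _
        have h1 := PySem.List.count_eq (val :: rest) w
        have h2 : List.count w (val :: rest) ≤ (val :: rest).length := List.count_le_length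
        simp only [decide_eq_true_eq]
        simp at h2 ⊢
        omega
      rw [hfil]
      rw [show TripsLoop (val :: rest) k = (false, none, none) from by
        simp [TripsLoop, hnl]]
      rfl

theorem rank_bounds (hand : List Int) (v : Int)
    (hv : v ∈ hand.map (fun c => PySem.Int.mod c 13)) : 0 ≤ v ∧ v < 13 := by
  rcases List.mem_map.mp hv with ⟨c, _, rfl⟩
  rw [PySem.Int.mod_eq_emod_of_pos (by norm_num)]
  exact ⟨Int.emod_nonneg c (by norm_num), Int.emod_lt_of_pos c (by norm_num)⟩

theorem cs_desc : (PySem.List.pyRange 12 (-1) (-1)).Pairwise (fun a b : Int => b ≤ a) := by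
  rw [PySem.List.pyRange_neg_one_eq_reverse]
  rw [List.pairwise_reverse]
  exact (PySem.List.pairwise_lt_pyRange_one 0 13).imp (fun h => le_of_lt h)

theorem Trips_eq_alt (hand : List Int) : Trips hand = Trips_alt hand := by
  unfold Trips Trips_alt
  set ranks := hand.map (fun c => PySem.Int.mod c 13) with hranks
  set L := PySem.List.sorted ranks (fun y => y) true with hL
  have hperm : L.Perm ranks := PySem.List.sorted_perm ranks (fun y => y) true
  have hsd : L.Pairwise (fun a b : Int => b ≤ a) :=
    PySem.List.sorted_pairwise_rev ranks (fun y => y)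
  rw [loop_spec L 0 hsd, scan_spec]
  have hLfil : L.filter (fun v => decide (3 ≤ PySem.List.count L v)) =
      L.filter (fun v => decide (3 ≤ PySem.List.count ranks v)) := by
    apply List.filter_congr
    intro w _
    rw [PySem.List.count_eq, PySem.List.count_eq, hperm.count_eq]
  rw [hLfil]
  set p : Int → Bool := fun v => decide (3 ≤ PySem.List.count ranks v) with hp
  have hp_mem : ∀ v, p v = true → v ∈ ranks := by
    intro v hv
    rw [hp] at hv
    simp only [decide_eq_true_eq] at hv
    rw [PySem.List.count_eq] at hv
    exact List.count_pos_iff.mp (by omega)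
  have hmemL : ∀ v, v ∈ L ↔ v ∈ ranks := fun v => PySem.List.mem_sorted ranks _ true v
  -- the two filtered heads agree
  have hheads : ((PySem.List.pyRange 12 (-1) (-1)).filter p).head? = (L.filter p).head? := by
    cases hc : (L.filter p).head? with
    | none =>
      rw [head_filter_none] at hc
      rw [head_filter_none]
      intro w hw hpw
      exact hc w ((hmemL w).mpr (hp_mem w hpw)) hpw
    | some v =>
      rw [head_filter_desc L p hsd] at hc
      rcases hc with ⟨hvL, hpv, hmax⟩
      rw [head_filter_desc _ p cs_desc]
      have hvr : v ∈ ranks := (hmemL v).mp hvL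
      rcases rank_bounds hand v hvr with ⟨hv0, hv13⟩
      refine ⟨PySem.List.mem_pyRange_neg_one.mpr ⟨by omega, by omega⟩, hpv, ?_⟩
      intro w hw hpw
      exact hmax w ((hmemL w).mpr (hp_mem w hpw)) hpw
  rw [hheads]
  cases hc : (L.filter p).head? with
  | none => rfl
  | some v =>
    -- kicker: fold-max of L from 0 equals max(ranks); ranks nonempty and nonneg
    rw [head_filter_desc L p hsd] at hc
    rcases hc with ⟨hvL, hpv, -⟩
    have hvr : v ∈ ranks := (hmemL v).mp hvL
    obtain ⟨h, t, hrt⟩ : ∃ h t, ranks = h :: t := by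
      cases hr : ranks with
      | nil => rw [hr] at hvr; simp at hvr
      | cons h t => exact ⟨h, t, rfl⟩
    have hfold : L.foldl max 0 = (PySem.List.max? ranks (fun y => y)).getD 0 := by
      rw [hrt, PySem.List.max?_id_cons, Option.getD_some]
      have hpl : List.foldl max 0 L = List.foldl max 0 (h :: t) := by
        refine hperm.foldl_eq (rcomm := ⟨fun b a₁ a₂ => by omega⟩) 0 |>.trans ?_
        rw [hrt]
      rw [hpl]
      simp only [List.foldl_cons]
      rw [foldl_max_max t 0 h]
      have hh0 : 0 ≤ h := (rank_bounds hand h (by rw [← hranks, hrt]; exact List.mem_cons_self)).1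
      have hle := (PySem.List.le_foldl_max t h).1
      exact max_eq_right (hh0.trans hle)
    rw [hfold]

-- ===== VERDICT (by name: the statement is the Claim_ definition above) =====
theorem Trips_spec : Claim_equal_Trips := by
  intro hand _
  unfold Spec_Trips
  exact Trips_eq_alt hand
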